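-- pv_equiv track=rewrite | github.com/ursakumeljfaks/Prakticna-matematika | 1.letnik/programiranje1/vaje/9/kamionisti.py | primerjaj
-- ===== SOURCE A (Python) =====
-- def primerjaj(prvi, drugi):
--     """vrne tabelo, v kateri je za vsak dan zapisano kdo je prevozil vecjo razdaljo"""
--     nova = []
--     prevozeni_prvi = 0
--     prevozeni_drugi = 0
--     dan = 0
--     while dan < len(prvi):
--         prevozeni_prvi += prvi[dan]
--         prevozeni_drugi += drugi[dan]
--         if prevozeni_prvi > prevozeni_drugi:
--             nova.append(1)
--         elif prevozeni_prvi < prevozeni_drugi: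
--             nova.append(2)
--         else:
--             nova.append(0)
--         dan += 1
--     return nova
-- ===== SOURCE B (Python) =====
-- def primerjaj(prvi, drugi):
--     """vrne tabelo, v kateri je za vsak dan zapisano kdo je prevozil vecjo razdaljo"""
--     # pass 1: prefix sums of prvi
--     c1 = []
--     t = 0
--     for x in prvi:
--         t += x
--         c1.append(t)
--     # pass 2: prefix sums of drugi, bounded by len(prvi) (raises like A if drugi is shorter)
--     c2 = []
--     t = 0
--     for dan in range(len(prvi)):
--         t += drugi[dan]
--         c2.append(t)
--     # pass 3: compare day by day
--     return [1 if a > b else 2 if a < b else 0 for a, b in zip(c1, c2)]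
-- ===== Notes on version B (the rewrite author's own statement) =====
-- stated objective: alternative
-- what changed: Replaces the single running-totals while-loop by three passes: build both prefix-sum lists first, then map a comparison over their zip.
import Mathlib
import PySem

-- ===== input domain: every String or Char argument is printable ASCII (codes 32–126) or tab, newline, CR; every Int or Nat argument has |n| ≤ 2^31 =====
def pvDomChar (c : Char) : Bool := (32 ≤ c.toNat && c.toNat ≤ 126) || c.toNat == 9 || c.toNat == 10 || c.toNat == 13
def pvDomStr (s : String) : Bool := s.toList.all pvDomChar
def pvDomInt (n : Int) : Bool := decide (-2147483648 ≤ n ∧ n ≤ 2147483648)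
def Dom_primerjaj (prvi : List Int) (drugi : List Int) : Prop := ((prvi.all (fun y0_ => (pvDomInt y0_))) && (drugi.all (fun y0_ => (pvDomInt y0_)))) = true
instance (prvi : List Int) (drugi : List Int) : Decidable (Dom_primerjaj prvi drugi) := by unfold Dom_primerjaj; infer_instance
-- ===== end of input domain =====

-- B replaces A's single running-totals while-loop by three passes (two prefix-sum lists,
-- then a zipped comparison); same cost, different decomposition.


-- ===== PORT A =====
-- A's while loop 'dan < len(prvi)' as structural recursion on prvi, carrying the index
-- dan (for drugi[dan]) and both running totals.  drugi[dan] is PySem.List.pyGet?;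
-- its .getD 0 totalizes the IndexError case, which Pre_ excludes.
def primerjajLoop (drugi : List Int) : List Int → Nat → Int → Int → List Int
  | [], _, _, _ => []
  | x :: rest, dan, p1, p2 =>
    let p1' := p1 + x
    let p2' := p2 + (PySem.List.pyGet? drugi (Int.ofNat dan)).getD 0
    (if p1' > p2' then (1 : Int) else if p1' < p2' then 2 else 0)
      :: primerjajLoop drugi rest (dan + 1) p1' p2'

def primerjaj (prvi : List Int) (drugi : List Int) : List Int :=
  primerjajLoop drugi prvi 0 0 0

-- ===== PORT B =====
-- pass 1 of Source B: prefix sums of prvi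
def prefixSums (t : Int) : List Int → List Int
  | [] => []
  | x :: xs => (t + x) :: prefixSums (t + x) xs

-- pass 2 of Source B: prefix sums of drugi over range(len(prvi)), indexing drugi[dan]
-- (pyGet? .getD 0 totalizes the IndexError case, which Pre_ excludes)
def prefixSums2 (drugi : List Int) : Nat → Nat → Int → List Int
  | 0, _, _ => []
  | n + 1, dan, t =>
    let t' := t + (PySem.List.pyGet? drugi (Int.ofNat dan)).getD 0
    t' :: prefixSums2 drugi n (dan + 1) t'

def primerjaj_alt (prvi : List Int) (drugi : List Int) : List Int :=
  let c1 := prefixSums 0 prvi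
  let c2 := prefixSums2 drugi prvi.length 0 0
  List.zipWith (fun a b => if a > b then (1 : Int) else if a < b then 2 else 0) c1 c2

-- ===== PRECONDITION & SPEC =====
-- Pre_ excludes exactly the inputs where Python A raises IndexError (drugi shorter
-- than prvi); B raises there too.
def Pre_primerjaj (prvi : List Int) (drugi : List Int) : Prop := prvi.length ≤ drugi.length
instance (prvi : List Int) (drugi : List Int) : Decidable (Pre_primerjaj prvi drugi) := by unfold Pre_primerjaj; infer_instance
def pvWitness_primerjaj : List Int × List Int := ([3, 1, 2], [2, 2, 2])

def Spec_primerjaj (prvi : List Int) (drugi : List Int) (out : List Int) : Prop := out = primerjaj_alt prvi drugi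
instance (prvi : List Int) (drugi : List Int) (out : List Int) : Decidable (Spec_primerjaj prvi drugi out) := by unfold Spec_primerjaj; infer_instance

-- ===== CLAIM (what is proved, stated in full; the proofs are below) =====
def Claim_equal_primerjaj : Prop := ∀ (prvi : List Int) (drugi : List Int), Dom_primerjaj prvi drugi → Pre_primerjaj prvi drugi → Spec_primerjaj prvi drugi (primerjaj prvi drugi)

-- ===== LEMMAS AND PROOFS =====
theorem primerjajLoop_eq (drugi : List Int) (prvi : List Int) :
    ∀ (dan : Nat) (p1 p2 : Int),
      primerjajLoop drugi prvi dan p1 p2 =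
        List.zipWith (fun a b => if a > b then (1 : Int) else if a < b then 2 else 0)
          (prefixSums p1 prvi) (prefixSums2 drugi prvi.length dan p2) := by
  induction prvi with
  | nil => intro dan p1 p2; simp [primerjajLoop, prefixSums, prefixSums2]
  | cons x rest ih =>
    intro dan p1 p2
    simp only [primerjajLoop, prefixSums, List.length_cons, prefixSums2, List.zipWith]
    exact congrArg _ (ih (dan + 1) _ _)

-- ===== VERDICT (by name: the statement is the Claim_ definition above) =====
theorem primerjaj_spec : Claim_equal_primerjaj := by
  intro prvi drugi _ _
  unfold Spec_primerjaj primerjaj primerjaj_alt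
  exact primerjajLoop_eq drugi prvi 0 0 0
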